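-- pv_equiv track=rewrite | github.com/Margosha881/HomeWork_Regex | regex.py | delete_duplicates_contact
-- ===== SOURCE A (Python) =====
-- def delete_duplicates_contact(new_contacts_list):
--     phone_book = dict()
--     for contact in new_contacts_list:
--         if contact[0] in phone_book:
--             contact_value = phone_book[contact[0]]
--             for i in range(len(contact_value)):
--                 if contact[i]:
--                     contact_value[i] = contact[i]
--         else:
--             phone_book[contact[0]] = contact
--     return list(phone_book.values())
-- ===== SOURCE B (Python) =====
-- def delete_duplicates_contact(new_contacts_list):
--     # Pass 1: group contacts by their first field, in first-appearance order.
--     groups = {}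
--     for contact in new_contacts_list:
--         groups.setdefault(contact[0], []).append(contact)
--     # Pass 2: merge each group into its first contact (mutated in place).
--     result = []
--     for group in groups.values():
--         base = group[0]
--         for other in group[1:]:
--             for i in range(len(base)):
--                 if other[i]:
--                     base[i] = other[i]
--         result.append(base)
--     return result
-- ===== Notes on version B (the rewrite author's own statement) =====
-- stated objective: alternative
-- what changed: A interleaves lookup-and-merge inside a single dict-building loop; B first groups all contacts by their first field into an ordered multimap and then, in a separate pass, folds each group's tail into its first contact.
-- outside the precondition, e.g. on delete_duplicates_contact([[]]): A raises IndexError, B raises IndexError; on delete_duplicates_contact([['a', '1', '2'], ['a', '3']]): A raises IndexError, B raises IndexError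
import Mathlib
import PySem

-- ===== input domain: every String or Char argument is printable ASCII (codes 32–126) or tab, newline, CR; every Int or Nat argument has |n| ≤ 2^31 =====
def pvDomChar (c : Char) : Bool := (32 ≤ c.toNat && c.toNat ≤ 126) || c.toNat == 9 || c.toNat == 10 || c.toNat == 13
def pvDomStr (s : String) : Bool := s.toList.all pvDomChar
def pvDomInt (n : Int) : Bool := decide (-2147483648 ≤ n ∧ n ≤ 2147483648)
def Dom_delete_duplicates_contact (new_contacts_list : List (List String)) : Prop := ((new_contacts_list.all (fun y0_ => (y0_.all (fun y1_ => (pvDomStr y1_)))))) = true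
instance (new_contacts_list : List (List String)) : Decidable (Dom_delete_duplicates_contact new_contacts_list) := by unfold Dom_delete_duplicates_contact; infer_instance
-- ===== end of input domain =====

-- B re-decomposes A: one pass groups contacts by first field, a second pass merges each group;
-- equivalence of return values (both Pythons also perform the same in-place mutation of the
-- first-occurrence lists; ports model that mutation through the dict value / the merged result).

-- ===== PORT A =====
-- inner loop `for i in range(len(contact_value)): if contact[i]: contact_value[i] = contact[i]`;
-- under Pre_ every accessed index is in range, so `getD i ""` is exact for `contact[i]`.
def pvMergeInto (base contact : List String) : List String :=
  (List.range base.length).foldl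
    (fun b i => if contact.getD i "" ≠ "" then b.set i (contact.getD i "") else b) base

-- one iteration of A's loop; Python's in-place update of the stored list is modelled by
-- re-inserting the merged value at the same key (PySem.Dict.insert overwrites in place).
def pvStepA (pb : PySem.Dict String (List String)) (contact : List String) :
    PySem.Dict String (List String) :=
  if pb.contains (contact.headD "") then
    pb.insert (contact.headD "") (pvMergeInto (pb.getD (contact.headD "") []) contact)
  else
    pb.insert (contact.headD "") contact

def delete_duplicates_contact (new_contacts_list : List (List String)) : List (List String) :=
  (new_contacts_list.foldl pvStepA PySem.Dict.empty).values

-- ===== PORT B =====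
-- `groups.setdefault(contact[0], []).append(contact)` = groups[k] := groups.get(k, []) + [contact]
def pvStepB (g : PySem.Dict String (List (List String))) (contact : List String) :
    PySem.Dict String (List (List String)) :=
  g.insert (contact.headD "") (g.getD (contact.headD "") [] ++ [contact])

def pvGroups (new_contacts_list : List (List String)) : PySem.Dict String (List (List String)) :=
  new_contacts_list.foldl pvStepB PySem.Dict.empty

-- `base = group[0]; for other in group[1:]: <inner loop>` (inner loop = same code as in A)
def pvMergeGroup (group : List (List String)) : List String :=
  match group with
  | [] => []          -- unreachable: every stored group is nonempty
  | base :: rest => rest.foldl pvMergeInto base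

def delete_duplicates_contact_alt (new_contacts_list : List (List String)) : List (List String) :=
  ((pvGroups new_contacts_list).values).map pvMergeGroup

-- ===== PRECONDITION & SPEC =====
-- Pre_ excludes exactly the inputs on which Python A raises IndexError: a contact that is the
-- empty list (contact[0]), or a contact shorter than the FIRST earlier contact sharing its key
-- (contact[i] for i in range(len(contact_value))).
def Pre_delete_duplicates_contact (new_contacts_list : List (List String)) : Prop :=
  (∀ c ∈ new_contacts_list, c ≠ []) ∧
  ∀ i j : Fin new_contacts_list.length, i.1 < j.1 →
    (new_contacts_list.get i).headD "" = (new_contacts_list.get j).headD "" →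
    (∀ k : Fin new_contacts_list.length, k.1 < i.1 →
        (new_contacts_list.get k).headD "" ≠ (new_contacts_list.get i).headD "") →
    (new_contacts_list.get i).length ≤ (new_contacts_list.get j).length
instance (new_contacts_list : List (List String)) : Decidable (Pre_delete_duplicates_contact new_contacts_list) := by
  unfold Pre_delete_duplicates_contact; infer_instance

def pvWitness_delete_duplicates_contact : List (List String) :=
  [["alice", "111", ""], ["bob", "222"], ["alice", "", "333"]]

def Spec_delete_duplicates_contact (new_contacts_list : List (List String)) (out : List (List String)) : Prop := out = delete_duplicates_contact_alt new_contacts_list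
instance (new_contacts_list : List (List String)) (out : List (List String)) : Decidable (Spec_delete_duplicates_contact new_contacts_list out) := by unfold Spec_delete_duplicates_contact; infer_instance

-- ===== CLAIM (what is proved, stated in full; the proofs are below) =====
def Claim_equal_delete_duplicates_contact : Prop := ∀ (new_contacts_list : List (List String)), Dom_delete_duplicates_contact new_contacts_list → Pre_delete_duplicates_contact new_contacts_list → Spec_delete_duplicates_contact new_contacts_list (delete_duplicates_contact new_contacts_list)

-- ===== LEMMAS AND PROOFS =====

theorem pv_witness_ok :
    Dom_delete_duplicates_contact pvWitness_delete_duplicates_contact ∧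
    Pre_delete_duplicates_contact pvWitness_delete_duplicates_contact := by decide

-- merging one more contact into a nonempty group folds on the right
theorem pvMergeGroup_append (base : List String) (rest : List (List String)) (c : List String) :
    pvMergeGroup ((base :: rest) ++ [c]) = pvMergeInto (pvMergeGroup (base :: rest)) c := by
  simp [pvMergeGroup, List.foldl_append]

-- the keys of the two accumulators coincide whenever the items are related by the merge map
theorem pv_keys_eq (pb : PySem.Dict String (List String))
    (g : PySem.Dict String (List (List String)))
    (h : pb.items = g.items.map (fun p => (p.1, pvMergeGroup p.2))) :
    pb.keys = g.keys := by
  simp only [PySem.Dict.keys, h, List.map_map]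
  rfl

-- one grouping step keeps the keys unique
theorem pv_step_nodup (g : PySem.Dict String (List (List String))) (c : List String)
    (h : g.keys.Nodup) : (pvStepB g c).keys.Nodup := by
  unfold pvStepB
  exact PySem.Dict.nodup_keys_insert _ _ _ h

-- one grouping step keeps every stored group nonempty
theorem pv_step_ne (g : PySem.Dict String (List (List String))) (c : List String)
    (hne : ∀ p ∈ g.items, p.2 ≠ []) : ∀ p ∈ (pvStepB g c).items, p.2 ≠ [] := by
  intro p hp
  rcases (PySem.Dict.mem_items_insert _ _ _ _).1 hp with h1 | ⟨h2, _⟩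
  · subst h1; simp
  · exact hne p h2

-- one step of each loop preserves the items relation
theorem pv_step_items (pb : PySem.Dict String (List String))
    (g : PySem.Dict String (List (List String))) (c : List String)
    (hnd : g.keys.Nodup) (hne : ∀ p ∈ g.items, p.2 ≠ [])
    (h : pb.items = g.items.map (fun p => (p.1, pvMergeGroup p.2))) :
    (pvStepA pb c).items = (pvStepB g c).items.map (fun p => (p.1, pvMergeGroup p.2)) := by
  have hkeys : pb.keys = g.keys := pv_keys_eq _ _ h
  have hndpb : pb.keys.Nodup := by rw [hkeys]; exact hnd
  have hc : pb.contains (c.headD "") = g.contains (c.headD "") := by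
    rw [PySem.Dict.contains_eq_decide_mem_keys, PySem.Dict.contains_eq_decide_mem_keys, hkeys]
  unfold pvStepA pvStepB
  by_cases hck : g.contains (c.headD "") = true
  · rw [if_pos (by rw [hc]; exact hck)]
    obtain ⟨grp, hget⟩ : ∃ grp, g.get? (c.headD "") = some grp := by
      cases hg : g.get? (c.headD "") with
      | none =>
        rw [(PySem.Dict.get?_eq_none_iff_contains _ _).1 hg] at hck
        exact (Bool.false_ne_true hck).elim
      | some grp => exact ⟨grp, rfl⟩
    have hmemg : (c.headD "", grp) ∈ g.items := PySem.Dict.mem_items_of_get?_eq_some _ hget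
    have hgetDg : g.getD (c.headD "") [] = grp := PySem.Dict.getD_of_get?_eq_some _ _ hget
    have hmempb : (c.headD "", pvMergeGroup grp) ∈ pb.items := by
      rw [h]; exact List.mem_map_of_mem hmemg
    have hgetDpb : pb.getD (c.headD "") [] = pvMergeGroup grp :=
      PySem.Dict.getD_of_mem_items _ hmempb hndpb _
    rw [PySem.Dict.items_insert_of_contains _ _ (by rw [hc]; exact hck),
        PySem.Dict.items_insert_of_contains _ _ hck, h, List.map_map, List.map_map]
    apply List.map_congr_left
    intro p hp
    by_cases hpk : p.1 = c.headD ""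
    · have hp2 : p.2 = grp := by
        have h1 : g.get? p.1 = some p.2 := PySem.Dict.get?_of_mem_items _ hp hnd
        rw [hpk, hget] at h1
        exact (Option.some.inj h1).symm
      obtain ⟨b, rest, hbr⟩ : ∃ b rest, grp = b :: rest :=
        List.exists_cons_of_ne_nil (hp2 ▸ hne p hp)
      simp only [Function.comp, hpk, hgetDg, hgetDpb, hp2, beq_self_eq_true, if_true, hbr,
        pvMergeGroup_append]
    · have hbk : (p.1 == c.headD "") = false := beq_eq_false_iff_ne.mpr hpk
      simp only [Function.comp, hbk, Bool.false_eq_true, if_false]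
  · have hck' : g.contains (c.headD "") = false := by simpa using hck
    rw [if_neg (by rw [hc, hck']; simp)]
    rw [PySem.Dict.items_insert_of_not_contains _ _ (by rw [hc]; exact hck'),
        PySem.Dict.items_insert_of_not_contains _ _ hck', List.map_append, ← h]
    rw [PySem.Dict.getD_of_not_contains _ _ hck']
    simp [pvMergeGroup]

-- loop invariant: A's phone_book is B's groups with every group pre-merged
theorem pv_inv (l : List (List String)) :
    ∀ (pb : PySem.Dict String (List String)) (g : PySem.Dict String (List (List String))),
      g.keys.Nodup →
      (∀ p ∈ g.items, p.2 ≠ []) →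
      pb.items = g.items.map (fun p => (p.1, pvMergeGroup p.2)) →
      (l.foldl pvStepA pb).items
        = (l.foldl pvStepB g).items.map (fun p => (p.1, pvMergeGroup p.2)) := by
  induction l with
  | nil => intro pb g _ _ h; simpa using h
  | cons c tl ih =>
    intro pb g hnd hne h
    simp only [List.foldl_cons]
    exact ih _ _ (pv_step_nodup g c hnd) (pv_step_ne g c hne) (pv_step_items pb g c hnd hne h)

-- ===== VERDICT (by name: the statement is the Claim_ definition above) =====
theorem delete_duplicates_contact_spec : Claim_equal_delete_duplicates_contact := by
  intro l _ _
  unfold Spec_delete_duplicates_contact delete_duplicates_contact delete_duplicates_contact_alt pvGroups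
  have h := pv_inv l PySem.Dict.empty PySem.Dict.empty (by simp [PySem.Dict.empty]) (by simp [PySem.Dict.empty]) (by simp [PySem.Dict.empty])
  simp only [PySem.Dict.values, h, List.map_map]
  rfl
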